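-- pv_equiv track=rewrite | github.com/Pepsimax1332/Advent-Of-Code-2021 | src/Day8.py | task_one
-- ===== SOURCE A (Python) =====
-- def task_one(data):
--
--     digits_count = {i:0 for i in range(10)}
--
--     for i, o in data:
--         for d in o:
--             if len(d) == 2:
--                 digits_count[1] += 1
--             elif len(d) == 4:
--                 digits_count[3] += 1
--             elif len(d) == 3:
--                 digits_count[6] += 1
--             elif len(d) == 7:
--                 digits_count[7] += 1
--
--     return sum(digits_count.values())
-- ===== SOURCE B (Python) =====
-- def task_one(data):
--     lengths = [len(d) for _, o in data for d in o]
--     return sum(lengths.count(L) for L in (2, 3, 4, 7))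
-- ===== Notes on version B (the rewrite author's own statement) =====
-- stated objective: simpler
-- what changed: Replaces A's ten-key dict seeded to zero plus a length-discriminating if/elif increment chain and a final sum over all dict values by flattening the output tokens to a list of lengths and summing list.count over just the four relevant lengths 2, 3, 4, 7.
import Mathlib
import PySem

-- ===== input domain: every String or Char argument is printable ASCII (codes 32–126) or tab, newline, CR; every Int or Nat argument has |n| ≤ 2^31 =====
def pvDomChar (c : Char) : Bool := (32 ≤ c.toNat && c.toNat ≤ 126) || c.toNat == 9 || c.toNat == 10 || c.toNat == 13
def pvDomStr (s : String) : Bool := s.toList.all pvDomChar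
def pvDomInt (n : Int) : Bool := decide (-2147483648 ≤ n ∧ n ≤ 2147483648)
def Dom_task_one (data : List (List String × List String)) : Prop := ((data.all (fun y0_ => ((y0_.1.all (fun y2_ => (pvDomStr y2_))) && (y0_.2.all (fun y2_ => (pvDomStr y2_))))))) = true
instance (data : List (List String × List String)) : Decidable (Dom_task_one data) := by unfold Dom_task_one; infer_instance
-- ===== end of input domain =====

-- B replaces A's pre-built ten-key dict + if/elif increment chain by flattening the
-- output tokens to their lengths and summing list.count over the four relevant lengths
-- (objective: simpler; no speed claim).

-- ===== PORT A =====
def task_one (data : List (List String × List String)) : Int :=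
  let digits_count : PySem.Dict Int Int :=
    (PySem.List.pyRange 0 10 1).foldl (fun d i => d.insert i 0) PySem.Dict.empty
  let digits_count :=
    data.foldl (fun d io =>
      io.2.foldl (fun d t =>
        if PySem.Str.len t = 2 then d.insert 1 (d.getD 1 0 + 1)
        else if PySem.Str.len t = 4 then d.insert 3 (d.getD 3 0 + 1)
        else if PySem.Str.len t = 3 then d.insert 6 (d.getD 6 0 + 1)
        else if PySem.Str.len t = 7 then d.insert 7 (d.getD 7 0 + 1)
        else d) d) digits_count
  digits_count.values.sum

-- ===== PORT B =====
def task_one_alt (data : List (List String × List String)) : Int :=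
  let lengths : List Int := (data.flatMap (fun io => io.2)).map (fun d => PySem.Str.len d)
  (([2, 3, 4, 7] : List Int).map (fun L => (lengths.count L : Int))).sum

-- ===== PRECONDITION & SPEC =====
def Spec_task_one (data : List (List String × List String)) (out : Int) : Prop := out = task_one_alt data
instance (data : List (List String × List String)) (out : Int) : Decidable (Spec_task_one data out) := by unfold Spec_task_one; infer_instance

-- ===== CLAIM (what is proved, stated in full; the proofs are below) =====
def Claim_equal_task_one : Prop := ∀ (data : List (List String × List String)), Dom_task_one data → Spec_task_one data (task_one data)

-- ===== LEMMAS AND PROOFS =====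

-- the shared predicate: the token's length is one of 2, 4, 3, 7
def pvHit (t : String) : Bool :=
  PySem.Str.len t == 2 || PySem.Str.len t == 4 || PySem.Str.len t == 3 || PySem.Str.len t == 7

-- incrementing one key of a nodup-key dict raises the value sum by 1
-- bumping f at one position of a nodup list raises the mapped sum by 1
lemma sum_map_update (l : List Int) (f : Int → Int) (k : Int) (hn : l.Nodup) (hk : k ∈ l) :
    (l.map (fun j => if j = k then f j + 1 else f j)).sum = (l.map f).sum + 1 := by
  induction l with
  | nil => cases hk
  | cons a l ih =>
    rcases List.mem_cons.mp hk with h1 | hk'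
    · subst h1
      have hc : ∀ j ∈ l, (if j = k then f j + 1 else f j) = f j := by
        intro j hj
        exact if_neg (by rintro rfl; exact (List.nodup_cons.mp hn).1 hj)
      simp [List.map_congr_left hc]
      ring
    · have ha : a ≠ k := by rintro rfl; exact (List.nodup_cons.mp hn).1 hk'
      simp [ha, ih (List.nodup_cons.mp hn).2 hk']
      ring

lemma inc_values_sum (d : PySem.Dict Int Int) (k : Int) (h : d.keys.Nodup) :
    (d.insert k (d.getD k 0 + 1)).values.sum = d.values.sum + 1 := by
  have h' := PySem.Dict.nodup_keys_insert d k (d.getD k 0 + 1) h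
  rw [PySem.Dict.values_eq_map_keys d h 0,
      PySem.Dict.values_eq_map_keys _ h' 0]
  by_cases hC : d.contains k = true
  · rw [PySem.Dict.keys_insert_of_contains d _ hC]
    have hc : ∀ j ∈ d.keys, (d.insert k (d.getD k 0 + 1)).getD j 0
        = if j = k then d.getD j 0 + 1 else d.getD j 0 := by
      intro j _
      rw [PySem.Dict.getD_insert]
      split_ifs with hj
      · subst hj; rfl
      · rfl
    rw [List.map_congr_left hc]
    exact sum_map_update d.keys _ k h ((PySem.Dict.contains_iff_mem_keys d k).mp hC)
  · have hC' : d.contains k = false := by simpa using hC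
    rw [PySem.Dict.keys_insert_of_not_contains d _ hC']
    have hc : ∀ j ∈ d.keys, (d.insert k (d.getD k 0 + 1)).getD j 0 = d.getD j 0 := by
      intro j hj
      rw [PySem.Dict.getD_insert]
      exact if_neg (by rintro rfl; exact hC ((PySem.Dict.contains_iff_mem_keys d j).mpr hj))
    rw [List.map_append, List.map_congr_left hc]
    simp [PySem.Dict.getD_insert, PySem.Dict.getD_of_not_contains d 0 hC']

-- A's inner-loop step preserves nodup keys
lemma step_nodup (d : PySem.Dict Int Int) (t : String) (h : d.keys.Nodup) :
    ((if PySem.Str.len t = 2 then d.insert 1 (d.getD 1 0 + 1)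
      else if PySem.Str.len t = 4 then d.insert 3 (d.getD 3 0 + 1)
      else if PySem.Str.len t = 3 then d.insert 6 (d.getD 6 0 + 1)
      else if PySem.Str.len t = 7 then d.insert 7 (d.getD 7 0 + 1)
      else d)).keys.Nodup := by
  split_ifs <;> first | exact PySem.Dict.nodup_keys_insert _ _ _ h | exact h

-- A's inner-loop step adds 1 to the value sum exactly when the token's length hits
lemma step_sum (d : PySem.Dict Int Int) (t : String) (h : d.keys.Nodup) :
    ((if PySem.Str.len t = 2 then d.insert 1 (d.getD 1 0 + 1)
      else if PySem.Str.len t = 4 then d.insert 3 (d.getD 3 0 + 1)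
      else if PySem.Str.len t = 3 then d.insert 6 (d.getD 6 0 + 1)
      else if PySem.Str.len t = 7 then d.insert 7 (d.getD 7 0 + 1)
      else d)).values.sum = d.values.sum + (if pvHit t then 1 else 0) := by
  unfold pvHit
  split_ifs with h2 h4 h3 h7 <;> simp_all [inc_values_sum _ _ h]

-- A's inner loop over a token list adds the number of hit tokens to the value sum
lemma inner_loop (l : List String) (d : PySem.Dict Int Int) (h : d.keys.Nodup) :
    (l.foldl (fun d t =>
        if PySem.Str.len t = 2 then d.insert 1 (d.getD 1 0 + 1)
        else if PySem.Str.len t = 4 then d.insert 3 (d.getD 3 0 + 1)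
        else if PySem.Str.len t = 3 then d.insert 6 (d.getD 6 0 + 1)
        else if PySem.Str.len t = 7 then d.insert 7 (d.getD 7 0 + 1)
        else d) d).values.sum = d.values.sum + (l.countP pvHit : Int) ∧
    (l.foldl (fun d t =>
        if PySem.Str.len t = 2 then d.insert 1 (d.getD 1 0 + 1)
        else if PySem.Str.len t = 4 then d.insert 3 (d.getD 3 0 + 1)
        else if PySem.Str.len t = 3 then d.insert 6 (d.getD 6 0 + 1)
        else if PySem.Str.len t = 7 then d.insert 7 (d.getD 7 0 + 1)
        else d) d).keys.Nodup := by
  induction l generalizing d with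
  | nil => simpa using h
  | cons t l ih =>
    have hn := step_nodup d t h
    obtain ⟨hs, hnd⟩ := ih _ hn
    constructor
    · rw [List.foldl_cons, hs, step_sum _ _ h, List.countP_cons]
      by_cases hp : pvHit t = true <;> (simp [hp]; try ring)
    · simpa using hnd
  
-- A's nested loop over data adds the total number of hit tokens
lemma outer_loop (data : List (List String × List String)) (d : PySem.Dict Int Int)
    (h : d.keys.Nodup) :
    (data.foldl (fun d io =>
      io.2.foldl (fun d t =>
        if PySem.Str.len t = 2 then d.insert 1 (d.getD 1 0 + 1)
        else if PySem.Str.len t = 4 then d.insert 3 (d.getD 3 0 + 1)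
        else if PySem.Str.len t = 3 then d.insert 6 (d.getD 6 0 + 1)
        else if PySem.Str.len t = 7 then d.insert 7 (d.getD 7 0 + 1)
        else d) d) d).values.sum
      = d.values.sum + ((data.flatMap (fun io => io.2)).countP pvHit : Int) := by
  induction data generalizing d with
  | nil => simp
  | cons io rest ih =>
    obtain ⟨hs, hnd⟩ := inner_loop io.2 d h
    rw [List.foldl_cons, ih _ hnd, hs]
    simp [List.countP_append]
    ring

-- B's four counts add up to exactly the hit count
lemma b_counts (l : List String) :
    ((([2, 3, 4, 7] : List Int).map
        (fun L => ((l.map (fun d => (PySem.Str.len d : Int))).count L : Int))).sum)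
      = (l.countP pvHit : Int) := by
  induction l with
  | nil => simp
  | cons t l ih =>
    simp only [List.map, List.sum_cons, List.countP_cons] at *
    by_cases h2 : PySem.Str.len t = 2 <;> by_cases h4 : PySem.Str.len t = 4 <;>
      by_cases h3 : PySem.Str.len t = 3 <;> by_cases h7 : PySem.Str.len t = 7 <;>
      simp [pvHit, List.count_cons] at * <;> omega

-- ===== VERDICT (by name: the statement is the Claim_ definition above) =====
theorem task_one_spec : Claim_equal_task_one := by
  intro data _
  unfold Spec_task_one task_one task_one_alt
  have h0 : ((PySem.List.pyRange 0 10 1).foldl (fun d i => d.insert i (0:Int)) PySem.Dict.empty).keys.Nodup := by decide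
  have hs0 : ((PySem.List.pyRange 0 10 1).foldl (fun d i => d.insert i (0:Int)) PySem.Dict.empty).values.sum = 0 := by decide
  rw [outer_loop data _ h0, hs0, b_counts]
  simp
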